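-- pv_equiv track=rewrite | github.com/simonxu14/MidiMind | src/arranger/templates/winds/clarinet_sustain.py | _adjust_to_range
-- ===== SOURCE A (Python) =====
-- def _adjust_to_range(pitch: int, range_tuple: tuple) -> int:
--     """调整音高到指定范围"""
--     min_pitch, max_pitch = range_tuple
--
--     if min_pitch <= pitch <= max_pitch:
--         return pitch
--
--     while pitch < min_pitch:
--         pitch += 12
--     while pitch > max_pitch:
--         pitch -= 12
--
--     return pitch
-- ===== SOURCE B (Python) =====
-- def _adjust_to_range(pitch: int, range_tuple: tuple) -> int:
--     """Closed-form octave shift: jumps in one arithmetic step instead of looping by 12s."""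
--     min_pitch, max_pitch = range_tuple
--     if min_pitch <= pitch <= max_pitch:
--         return pitch
--     if pitch < min_pitch:
--         pitch += 12 * ((min_pitch - pitch + 11) // 12)
--     if pitch > max_pitch:
--         pitch -= 12 * ((pitch - max_pitch + 11) // 12)
--     return pitch
-- ===== Notes on version B (the rewrite author's own statement) =====
-- stated objective: faster
-- what changed: Replaced the two += / -= 12 while loops with closed-form ceiling-division arithmetic that computes each octave shift in one step.
import Mathlib
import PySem

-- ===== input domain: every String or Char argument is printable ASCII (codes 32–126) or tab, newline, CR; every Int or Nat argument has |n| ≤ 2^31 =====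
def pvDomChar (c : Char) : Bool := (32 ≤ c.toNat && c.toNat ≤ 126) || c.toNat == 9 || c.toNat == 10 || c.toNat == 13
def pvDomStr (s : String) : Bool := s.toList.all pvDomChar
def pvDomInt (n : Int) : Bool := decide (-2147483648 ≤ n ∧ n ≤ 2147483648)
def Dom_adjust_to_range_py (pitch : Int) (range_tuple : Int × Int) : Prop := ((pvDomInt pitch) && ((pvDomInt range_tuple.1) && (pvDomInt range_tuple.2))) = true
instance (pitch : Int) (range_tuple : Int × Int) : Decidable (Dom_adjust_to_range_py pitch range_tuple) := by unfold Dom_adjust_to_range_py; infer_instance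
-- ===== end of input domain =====

-- B replaces A's two step-by-12 while loops with closed-form ceiling-division shifts (faster).

-- ===== PORT A =====
-- while pitch < min_pitch: pitch += 12
def pvUpLoop (pitch min_pitch : Int) : Int :=
  if pitch < min_pitch then pvUpLoop (pitch + 12) min_pitch else pitch
termination_by (min_pitch - pitch).toNat
decreasing_by omega

-- while pitch > max_pitch: pitch -= 12
def pvDownLoop (pitch max_pitch : Int) : Int :=
  if pitch > max_pitch then pvDownLoop (pitch - 12) max_pitch else pitch
termination_by (pitch - max_pitch).toNat
decreasing_by omega

def adjust_to_range_py (pitch : Int) (range_tuple : Int × Int) : Int :=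
  let min_pitch := range_tuple.1
  let max_pitch := range_tuple.2
  if min_pitch ≤ pitch ∧ pitch ≤ max_pitch then pitch
  else pvDownLoop (pvUpLoop pitch min_pitch) max_pitch

-- ===== PORT B =====
def adjust_to_range_py_alt (pitch : Int) (range_tuple : Int × Int) : Int :=
  let min_pitch := range_tuple.1
  let max_pitch := range_tuple.2
  if min_pitch ≤ pitch ∧ pitch ≤ max_pitch then pitch
  else
    let p1 := if pitch < min_pitch then
        pitch + 12 * PySem.Int.floordiv (min_pitch - pitch + 11) 12
      else pitch
    if p1 > max_pitch then p1 - 12 * PySem.Int.floordiv (p1 - max_pitch + 11) 12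
    else p1

-- ===== PRECONDITION & SPEC =====
def Spec_adjust_to_range_py (pitch : Int) (range_tuple : Int × Int) (out : Int) : Prop := out = adjust_to_range_py_alt pitch range_tuple
instance (pitch : Int) (range_tuple : Int × Int) (out : Int) : Decidable (Spec_adjust_to_range_py pitch range_tuple out) := by unfold Spec_adjust_to_range_py; infer_instance

-- ===== CLAIM (what is proved, stated in full; the proofs are below) =====
def Claim_equal_adjust_to_range_py : Prop := ∀ (pitch : Int) (range_tuple : Int × Int), Dom_adjust_to_range_py pitch range_tuple → Spec_adjust_to_range_py pitch range_tuple (adjust_to_range_py pitch range_tuple)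

-- ===== LEMMAS AND PROOFS =====

theorem pvUpLoop_closed (pitch m : Int) :
    pvUpLoop pitch m = if pitch < m then pitch + 12 * ((m - pitch + 11) / 12) else pitch := by
  by_cases h : pitch < m
  · rw [pvUpLoop]
    simp only [h, if_pos]
    by_cases h2 : pitch + 12 < m
    · rw [pvUpLoop_closed (pitch + 12) m]
      simp only [h2, if_pos]
      omega
    · rw [pvUpLoop, if_neg h2]
      omega
  · rw [pvUpLoop]; simp [h]
termination_by (m - pitch).toNat
decreasing_by omega

theorem pvDownLoop_closed (pitch m : Int) :
    pvDownLoop pitch m = if pitch > m then pitch - 12 * ((pitch - m + 11) / 12) else pitch := by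
  by_cases h : pitch > m
  · rw [pvDownLoop]
    simp only [h, if_pos]
    by_cases h2 : pitch - 12 > m
    · rw [pvDownLoop_closed (pitch - 12) m]
      simp only [h2, if_pos]
      omega
    · rw [pvDownLoop, if_neg h2]
      omega
  · rw [pvDownLoop]; simp [h]
termination_by (pitch - m).toNat
decreasing_by omega

-- ===== VERDICT (by name: the statement is the Claim_ definition above) =====
theorem adjust_to_range_py_spec : Claim_equal_adjust_to_range_py := by
  intro pitch rt _
  unfold Spec_adjust_to_range_py adjust_to_range_py adjust_to_range_py_alt
  obtain ⟨lo, hi⟩ := rt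
  simp only
  by_cases hin : lo ≤ pitch ∧ pitch ≤ hi
  · simp [hin]
  · simp only [hin, if_neg, not_false_iff]
    rw [pvUpLoop_closed, pvDownLoop_closed]
    rw [PySem.Int.floordiv_eq_ediv_of_pos (by norm_num : (0:ℤ) < 12)]
    by_cases h1 : pitch < lo
    · simp only [h1, if_pos]
      by_cases h2 : pitch + 12 * ((lo - pitch + 11) / 12) > hi
      · simp only [h2, if_pos]
        rw [PySem.Int.floordiv_eq_ediv_of_pos (by norm_num : (0:ℤ) < 12)]
      · simp [h2]
    · simp only [h1, if_neg, not_false_iff]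
      have h2 : pitch > hi := by omega
      simp only [h2, if_pos]
      rw [PySem.Int.floordiv_eq_ediv_of_pos (by norm_num : (0:ℤ) < 12)]
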